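-- pv_equiv track=rewrite | github.com/genglongling/CS224V-MACI-for-Research-Agent | MACI_stock_prediction/agent_prompts.py | get_analyze_data_prompt
-- ===== SOURCE A (Python) =====
-- def get_analyze_data_prompt(question, selected_features=None):
--     """
--     为数据分析功能生成提示词，根据选择的功能进行调整
--
--     Args:
--         question: 用户问题
--         selected_features: 用户选择的功能列表
--
--     Returns:
--         适用于analyze_data的提示词
--     """
--     base_prompt = "You are an investment research assistant. Only use retrieved data for your analysis."
--
--     feature_specific_prompts = []
--
--     if selected_features:
--         if "simple-complex-calculation" in selected_features:
--             feature_specific_prompts.append("""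
--             Perform relevant calculations on the numerical data, showing your work clearly.
--             Start with basic metrics and progress to more complex analyses if needed.
--             """)
--
--         if "ml-reasoning" in selected_features:
--             feature_specific_prompts.append("""
--             Analyze patterns in the data that might indicate trends, seasonality, or correlations.
--             Consider how machine learning approaches would interpret these patterns.
--             """)
--
--         if "validation" in selected_features:
--             feature_specific_prompts.append("""
--             Critically evaluate the quality and completeness of the data.
--             Identify potential biases or limitations in the available information.
--             Clearly state your confidence level in different parts of your analysis.
--             """)
--
--         if "decision-making" in selected_features:
--             feature_specific_prompts.append("""
--             Provide clear, justified recommendations based on the data.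
--             Consider alternative interpretations and explain why your conclusion is most supported.
--             Discuss risks and uncertainties associated with your recommendations.
--             """)
--
--         if "operation" in selected_features:
--             feature_specific_prompts.append("""
--             Create a well-structured summary of your findings.
--             Describe how the data could be effectively visualized.
--             Suggest concrete next steps or actions based on your analysis.
--             """)
--
--     # 组合所有特定功能的提示词
--     if feature_specific_prompts:
--         for prompt in feature_specific_prompts:
--             base_prompt += prompt
--
--     return base_prompt
-- ===== SOURCE B (Python) =====
-- _BASE = "You are an investment research assistant. Only use retrieved data for your analysis."
--
-- _TEXTS = (
--     """
--             Perform relevant calculations on the numerical data, showing your work clearly.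
--             Start with basic metrics and progress to more complex analyses if needed.
--             """,
--     """
--             Analyze patterns in the data that might indicate trends, seasonality, or correlations.
--             Consider how machine learning approaches would interpret these patterns.
--             """,
--     """
--             Critically evaluate the quality and completeness of the data.
--             Identify potential biases or limitations in the available information.
--             Clearly state your confidence level in different parts of your analysis.
--             """,
--     """
--             Provide clear, justified recommendations based on the data.
--             Consider alternative interpretations and explain why your conclusion is most supported.
--             Discuss risks and uncertainties associated with your recommendations.
--             """,
--     """
--             Create a well-structured summary of your findings.
--             Describe how the data could be effectively visualized.
--             Suggest concrete next steps or actions based on your analysis.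
--             """,
-- )
--
-- # bit assigned to each known feature flag, in the prompt order
-- _BIT = {
--     "simple-complex-calculation": 1,
--     "ml-reasoning": 2,
--     "validation": 4,
--     "decision-making": 8,
--     "operation": 16,
-- }
--
-- # all 32 possible prompt suffixes, precomputed once, indexed by feature bitmask
-- _SUFFIX = ["".join(t for i, t in enumerate(_TEXTS) if m >> i & 1)
--            for m in range(32)]
--
--
-- def get_analyze_data_prompt(question, selected_features=None):
--     if not selected_features:
--         return _BASE
--     mask = 0
--     for f in selected_features:
--         mask |= _BIT.get(f, 0)
--     return _BASE + _SUFFIX[mask]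
-- ===== Notes on version B (the rewrite author's own statement) =====
-- stated objective: alternative
-- what changed: Replaces A's five membership scans of selected_features plus list-append/accumulate loops by a single pass over selected_features that ORs per-flag bits (one dict lookup each) into a bitmask, then returns the base prompt plus one lookup in a precomputed 32-entry suffix table.
import Mathlib
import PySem

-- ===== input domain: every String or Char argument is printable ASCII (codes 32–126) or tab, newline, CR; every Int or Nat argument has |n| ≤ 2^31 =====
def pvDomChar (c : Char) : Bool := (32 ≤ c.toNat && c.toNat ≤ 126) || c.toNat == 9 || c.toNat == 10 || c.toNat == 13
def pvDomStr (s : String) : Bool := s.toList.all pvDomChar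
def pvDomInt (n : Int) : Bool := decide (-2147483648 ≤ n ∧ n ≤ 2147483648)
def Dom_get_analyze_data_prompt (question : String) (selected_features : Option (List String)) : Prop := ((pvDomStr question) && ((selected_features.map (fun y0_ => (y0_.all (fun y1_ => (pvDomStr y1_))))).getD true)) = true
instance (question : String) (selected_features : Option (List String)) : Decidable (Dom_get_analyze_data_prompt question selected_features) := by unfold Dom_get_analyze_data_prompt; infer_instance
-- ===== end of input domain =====

-- B replaces A's five membership scans + append/accumulate loops by ONE pass over the input
-- that ORs per-flag bits (dict lookup) into a mask, then a single lookup in a precomputed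
-- 32-entry suffix table (alternative algorithm, same cost).

-- shared string literals (base prompt and the five feature prompt texts, verbatim)
def pvBase : String := "You are an investment research assistant. Only use retrieved data for your analysis."
def pvP1 : String := "\n            Perform relevant calculations on the numerical data, showing your work clearly.\n            Start with basic metrics and progress to more complex analyses if needed.\n            "
def pvP2 : String := "\n            Analyze patterns in the data that might indicate trends, seasonality, or correlations.\n            Consider how machine learning approaches would interpret these patterns.\n            "
def pvP3 : String := "\n            Critically evaluate the quality and completeness of the data.\n            Identify potential biases or limitations in the available information.\n            Clearly state your confidence level in different parts of your analysis.\n            "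
def pvP4 : String := "\n            Provide clear, justified recommendations based on the data.\n            Consider alternative interpretations and explain why your conclusion is most supported.\n            Discuss risks and uncertainties associated with your recommendations.\n            "
def pvP5 : String := "\n            Create a well-structured summary of your findings.\n            Describe how the data could be effectively visualized.\n            Suggest concrete next steps or actions based on your analysis.\n            "

-- ===== PORT A =====
def get_analyze_data_prompt (question : String) (selected_features : Option (List String)) : String :=
  let base_prompt := pvBase
  let feature_specific_prompts : List String :=
    match selected_features with
    | none => []            -- `if selected_features:` is false for None
    | some sel =>
      if sel.isEmpty then []     -- … and for the empty list
      else
        let l : List String := []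
        let l := if sel.contains "simple-complex-calculation" then l ++ [pvP1] else l
        let l := if sel.contains "ml-reasoning" then l ++ [pvP2] else l
        let l := if sel.contains "validation" then l ++ [pvP3] else l
        let l := if sel.contains "decision-making" then l ++ [pvP4] else l
        let l := if sel.contains "operation" then l ++ [pvP5] else l
        l
  if feature_specific_prompts.isEmpty then base_prompt
  else feature_specific_prompts.foldl (fun acc p => acc ++ p) base_prompt

-- ===== PORT B =====
def pvTexts : List String := [pvP1, pvP2, pvP3, pvP4, pvP5]

def pvBitDict : PySem.Dict String Nat :=
  PySem.Dict.ofList [("simple-complex-calculation", 1), ("ml-reasoning", 2),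
                     ("validation", 4), ("decision-making", 8), ("operation", 16)]

-- _SUFFIX: all 32 possible suffixes, indexed by the feature bitmask
def pvSuffix : List String :=
  (List.range 32).map (fun m =>
    PySem.Str.join "" (((PySem.List.enumerate pvTexts).filter
      (fun it => (m >>> it.1.toNat) &&& 1 == 1)).map Prod.snd))

def get_analyze_data_prompt_alt (question : String) (selected_features : Option (List String)) : String :=
  match selected_features with
  | none => pvBase
  | some sel =>
    if sel.isEmpty then pvBase
    else
      let mask := sel.foldl (fun m f => m ||| (PySem.Dict.getD pvBitDict f 0)) 0
      pvBase ++ pvSuffix.getD mask ""   -- _SUFFIX[mask]; mask < 32 always, so getD is exact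

-- ===== PRECONDITION & SPEC =====
def Spec_get_analyze_data_prompt (question : String) (selected_features : Option (List String)) (out : String) : Prop := out = get_analyze_data_prompt_alt question selected_features
instance (question : String) (selected_features : Option (List String)) (out : String) : Decidable (Spec_get_analyze_data_prompt question selected_features out) := by unfold Spec_get_analyze_data_prompt; infer_instance

-- ===== CLAIM (what is proved, stated in full; the proofs are below) =====
def Claim_equal_get_analyze_data_prompt : Prop := ∀ (question : String) (selected_features : Option (List String)), Dom_get_analyze_data_prompt question selected_features → Spec_get_analyze_data_prompt question selected_features (get_analyze_data_prompt question selected_features)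

-- ===== LEMMAS AND PROOFS =====

theorem pv_join_nil : PySem.Str.join "" ([] : List String) = "" := rfl

theorem pv_join_cons (a : String) (l : List String) :
    PySem.Str.join "" (a :: l) = a ++ PySem.Str.join "" l := by
  apply String.toList_inj.mp
  cases l with
  | nil => simp [PySem.Str.join, PySem.Chars.join, List.intercalate]
  | cons b l' => simp [PySem.Str.join, PySem.Chars.join, List.intercalate]

-- the per-element bit function of B's loop
def pvBit (f : String) : Nat := PySem.Dict.getD pvBitDict f 0

-- the closed-form mask determined by the five memberships
def pvMaskOf (sel : List String) : Nat :=
  (if sel.contains "simple-complex-calculation" then 1 else 0) |||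
  (if sel.contains "ml-reasoning" then 2 else 0) |||
  (if sel.contains "validation" then 4 else 0) |||
  (if sel.contains "decision-making" then 8 else 0) |||
  (if sel.contains "operation" then 16 else 0)

theorem pv_foldl_or (sel : List String) (a : Nat) :
    sel.foldl (fun m f => m ||| pvBit f) a = a ||| sel.foldl (fun m f => m ||| pvBit f) 0 := by
  induction sel generalizing a with
  | nil => simp
  | cons x xs ih =>
    simp only [List.foldl_cons]
    rw [ih (a ||| pvBit x), ih (0 ||| pvBit x)]
    simp [Nat.or_assoc]

theorem pvBit_not_flag (x : String) (e1 : x ≠ "simple-complex-calculation")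
    (e2 : x ≠ "ml-reasoning") (e3 : x ≠ "validation") (e4 : x ≠ "decision-making")
    (e5 : x ≠ "operation") : pvBit x = 0 := by
  simp [pvBit, pvBitDict, PySem.Dict.ofList, PySem.Dict.update, PySem.Dict.getD_insert,
        PySem.Dict.getD_empty, e1, e2, e3, e4, e5]

theorem pv_mask_cons (x : String) (xs : List String) :
    pvMaskOf (x :: xs) = pvBit x ||| pvMaskOf xs := by
  by_cases e1 : x = "simple-complex-calculation"
  · subst e1
    by_cases h1 : "simple-complex-calculation" ∈ xs <;>
    by_cases h2 : "ml-reasoning" ∈ xs <;>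
    by_cases h3 : "validation" ∈ xs <;>
    by_cases h4 : "decision-making" ∈ xs <;>
    by_cases h5 : "operation" ∈ xs <;>
    simp [pvMaskOf, h1, h2, h3, h4, h5] <;> decide
  · by_cases e2 : x = "ml-reasoning"
    · subst e2
      by_cases h1 : "simple-complex-calculation" ∈ xs <;>
      by_cases h2 : "ml-reasoning" ∈ xs <;>
      by_cases h3 : "validation" ∈ xs <;>
      by_cases h4 : "decision-making" ∈ xs <;>
      by_cases h5 : "operation" ∈ xs <;>
      simp [pvMaskOf, h1, h2, h3, h4, h5] <;> decide
    · by_cases e3 : x = "validation"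
      · subst e3
        by_cases h1 : "simple-complex-calculation" ∈ xs <;>
        by_cases h2 : "ml-reasoning" ∈ xs <;>
        by_cases h3 : "validation" ∈ xs <;>
        by_cases h4 : "decision-making" ∈ xs <;>
        by_cases h5 : "operation" ∈ xs <;>
        simp [pvMaskOf, h1, h2, h3, h4, h5] <;> decide
      · by_cases e4 : x = "decision-making"
        · subst e4
          by_cases h1 : "simple-complex-calculation" ∈ xs <;>
          by_cases h2 : "ml-reasoning" ∈ xs <;>
          by_cases h3 : "validation" ∈ xs <;>
          by_cases h4 : "decision-making" ∈ xs <;>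
          by_cases h5 : "operation" ∈ xs <;>
          simp [pvMaskOf, h1, h2, h3, h4, h5] <;> decide
        · by_cases e5 : x = "operation"
          · subst e5
            by_cases h1 : "simple-complex-calculation" ∈ xs <;>
            by_cases h2 : "ml-reasoning" ∈ xs <;>
            by_cases h3 : "validation" ∈ xs <;>
            by_cases h4 : "decision-making" ∈ xs <;>
            by_cases h5 : "operation" ∈ xs <;>
            simp [pvMaskOf, h1, h2, h3, h4, h5] <;> decide
          · have h0 : pvBit x = 0 := pvBit_not_flag x e1 e2 e3 e4 e5
            simp [pvMaskOf, h0, Ne.symm e1, Ne.symm e2, Ne.symm e3, Ne.symm e4, Ne.symm e5]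

theorem pv_mask_eq (sel : List String) :
    sel.foldl (fun m f => m ||| pvBit f) 0 = pvMaskOf sel := by
  induction sel with
  | nil => rfl
  | cons x xs ih =>
    simp only [List.foldl_cons, Nat.zero_or]
    rw [pv_foldl_or, ih, ← pv_mask_cons]

set_option maxRecDepth 8192 in
theorem pv_eq (question : String) (sel : Option (List String)) :
    get_analyze_data_prompt question sel = get_analyze_data_prompt_alt question sel := by
  cases sel with
  | none => rfl
  | some s =>
    unfold get_analyze_data_prompt get_analyze_data_prompt_alt
    by_cases he : s.isEmpty
    · simp [he]
    · simp only [he, Bool.false_eq_true, if_false, pv_mask_eq s,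
        show (fun (m : Nat) (f : String) => m ||| PySem.Dict.getD pvBitDict f 0) = (fun m f => m ||| pvBit f) from rfl]
      by_cases h1 : "simple-complex-calculation" ∈ s
      · by_cases h2 : "ml-reasoning" ∈ s
        · by_cases h3 : "validation" ∈ s
          · by_cases h4 : "decision-making" ∈ s
            · by_cases h5 : "operation" ∈ s
              · have hm : pvMaskOf s = 31 := by simp [pvMaskOf, h1, h2, h3, h4, h5]
                have hsf : pvSuffix.getD 31 "" = PySem.Str.join "" ([pvP1, pvP2, pvP3, pvP4, pvP5] : List String) := by
                  rw [show pvSuffix.getD 31 "" = pvSuffix[31]! from rfl]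
                  simp [pvSuffix, pvTexts, PySem.List.enumerate]
                rw [hm, hsf]
                simp [h1, h2, h3, h4, h5, pv_join_cons, pv_join_nil, String.append_assoc]
              · have hm : pvMaskOf s = 15 := by simp [pvMaskOf, h1, h2, h3, h4, h5]
                have hsf : pvSuffix.getD 15 "" = PySem.Str.join "" ([pvP1, pvP2, pvP3, pvP4] : List String) := by
                  rw [show pvSuffix.getD 15 "" = pvSuffix[15]! from rfl]
                  simp [pvSuffix, pvTexts, PySem.List.enumerate]
                rw [hm, hsf]
                simp [h1, h2, h3, h4, h5, pv_join_cons, pv_join_nil, String.append_assoc]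
            · by_cases h5 : "operation" ∈ s
              · have hm : pvMaskOf s = 23 := by simp [pvMaskOf, h1, h2, h3, h4, h5]
                have hsf : pvSuffix.getD 23 "" = PySem.Str.join "" ([pvP1, pvP2, pvP3, pvP5] : List String) := by
                  rw [show pvSuffix.getD 23 "" = pvSuffix[23]! from rfl]
                  simp [pvSuffix, pvTexts, PySem.List.enumerate]
                rw [hm, hsf]
                simp [h1, h2, h3, h4, h5, pv_join_cons, pv_join_nil, String.append_assoc]
              · have hm : pvMaskOf s = 7 := by simp [pvMaskOf, h1, h2, h3, h4, h5]
                have hsf : pvSuffix.getD 7 "" = PySem.Str.join "" ([pvP1, pvP2, pvP3] : List String) := by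
                  rw [show pvSuffix.getD 7 "" = pvSuffix[7]! from rfl]
                  simp [pvSuffix, pvTexts, PySem.List.enumerate]
                rw [hm, hsf]
                simp [h1, h2, h3, h4, h5, pv_join_cons, pv_join_nil, String.append_assoc]
          · by_cases h4 : "decision-making" ∈ s
            · by_cases h5 : "operation" ∈ s
              · have hm : pvMaskOf s = 27 := by simp [pvMaskOf, h1, h2, h3, h4, h5]
                have hsf : pvSuffix.getD 27 "" = PySem.Str.join "" ([pvP1, pvP2, pvP4, pvP5] : List String) := by
                  rw [show pvSuffix.getD 27 "" = pvSuffix[27]! from rfl]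
                  simp [pvSuffix, pvTexts, PySem.List.enumerate]
                rw [hm, hsf]
                simp [h1, h2, h3, h4, h5, pv_join_cons, pv_join_nil, String.append_assoc]
              · have hm : pvMaskOf s = 11 := by simp [pvMaskOf, h1, h2, h3, h4, h5]
                have hsf : pvSuffix.getD 11 "" = PySem.Str.join "" ([pvP1, pvP2, pvP4] : List String) := by
                  rw [show pvSuffix.getD 11 "" = pvSuffix[11]! from rfl]
                  simp [pvSuffix, pvTexts, PySem.List.enumerate]
                rw [hm, hsf]
                simp [h1, h2, h3, h4, h5, pv_join_cons, pv_join_nil, String.append_assoc]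
            · by_cases h5 : "operation" ∈ s
              · have hm : pvMaskOf s = 19 := by simp [pvMaskOf, h1, h2, h3, h4, h5]
                have hsf : pvSuffix.getD 19 "" = PySem.Str.join "" ([pvP1, pvP2, pvP5] : List String) := by
                  rw [show pvSuffix.getD 19 "" = pvSuffix[19]! from rfl]
                  simp [pvSuffix, pvTexts, PySem.List.enumerate]
                rw [hm, hsf]
                simp [h1, h2, h3, h4, h5, pv_join_cons, pv_join_nil, String.append_assoc]
              · have hm : pvMaskOf s = 3 := by simp [pvMaskOf, h1, h2, h3, h4, h5]
                have hsf : pvSuffix.getD 3 "" = PySem.Str.join "" ([pvP1, pvP2] : List String) := by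
                  rw [show pvSuffix.getD 3 "" = pvSuffix[3]! from rfl]
                  simp [pvSuffix, pvTexts, PySem.List.enumerate]
                rw [hm, hsf]
                simp [h1, h2, h3, h4, h5, pv_join_cons, pv_join_nil, String.append_assoc]
        · by_cases h3 : "validation" ∈ s
          · by_cases h4 : "decision-making" ∈ s
            · by_cases h5 : "operation" ∈ s
              · have hm : pvMaskOf s = 29 := by simp [pvMaskOf, h1, h2, h3, h4, h5]
                have hsf : pvSuffix.getD 29 "" = PySem.Str.join "" ([pvP1, pvP3, pvP4, pvP5] : List String) := by
                  rw [show pvSuffix.getD 29 "" = pvSuffix[29]! from rfl]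
                  simp [pvSuffix, pvTexts, PySem.List.enumerate]
                rw [hm, hsf]
                simp [h1, h2, h3, h4, h5, pv_join_cons, pv_join_nil, String.append_assoc]
              · have hm : pvMaskOf s = 13 := by simp [pvMaskOf, h1, h2, h3, h4, h5]
                have hsf : pvSuffix.getD 13 "" = PySem.Str.join "" ([pvP1, pvP3, pvP4] : List String) := by
                  rw [show pvSuffix.getD 13 "" = pvSuffix[13]! from rfl]
                  simp [pvSuffix, pvTexts, PySem.List.enumerate]
                rw [hm, hsf]
                simp [h1, h2, h3, h4, h5, pv_join_cons, pv_join_nil, String.append_assoc]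
            · by_cases h5 : "operation" ∈ s
              · have hm : pvMaskOf s = 21 := by simp [pvMaskOf, h1, h2, h3, h4, h5]
                have hsf : pvSuffix.getD 21 "" = PySem.Str.join "" ([pvP1, pvP3, pvP5] : List String) := by
                  rw [show pvSuffix.getD 21 "" = pvSuffix[21]! from rfl]
                  simp [pvSuffix, pvTexts, PySem.List.enumerate]
                rw [hm, hsf]
                simp [h1, h2, h3, h4, h5, pv_join_cons, pv_join_nil, String.append_assoc]
              · have hm : pvMaskOf s = 5 := by simp [pvMaskOf, h1, h2, h3, h4, h5]
                have hsf : pvSuffix.getD 5 "" = PySem.Str.join "" ([pvP1, pvP3] : List String) := by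
                  rw [show pvSuffix.getD 5 "" = pvSuffix[5]! from rfl]
                  simp [pvSuffix, pvTexts, PySem.List.enumerate]
                rw [hm, hsf]
                simp [h1, h2, h3, h4, h5, pv_join_cons, pv_join_nil, String.append_assoc]
          · by_cases h4 : "decision-making" ∈ s
            · by_cases h5 : "operation" ∈ s
              · have hm : pvMaskOf s = 25 := by simp [pvMaskOf, h1, h2, h3, h4, h5]
                have hsf : pvSuffix.getD 25 "" = PySem.Str.join "" ([pvP1, pvP4, pvP5] : List String) := by
                  rw [show pvSuffix.getD 25 "" = pvSuffix[25]! from rfl]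
                  simp [pvSuffix, pvTexts, PySem.List.enumerate]
                rw [hm, hsf]
                simp [h1, h2, h3, h4, h5, pv_join_cons, pv_join_nil, String.append_assoc]
              · have hm : pvMaskOf s = 9 := by simp [pvMaskOf, h1, h2, h3, h4, h5]
                have hsf : pvSuffix.getD 9 "" = PySem.Str.join "" ([pvP1, pvP4] : List String) := by
                  rw [show pvSuffix.getD 9 "" = pvSuffix[9]! from rfl]
                  simp [pvSuffix, pvTexts, PySem.List.enumerate]
                rw [hm, hsf]
                simp [h1, h2, h3, h4, h5, pv_join_cons, pv_join_nil, String.append_assoc]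
            · by_cases h5 : "operation" ∈ s
              · have hm : pvMaskOf s = 17 := by simp [pvMaskOf, h1, h2, h3, h4, h5]
                have hsf : pvSuffix.getD 17 "" = PySem.Str.join "" ([pvP1, pvP5] : List String) := by
                  rw [show pvSuffix.getD 17 "" = pvSuffix[17]! from rfl]
                  simp [pvSuffix, pvTexts, PySem.List.enumerate]
                rw [hm, hsf]
                simp [h1, h2, h3, h4, h5, pv_join_cons, pv_join_nil, String.append_assoc]
              · have hm : pvMaskOf s = 1 := by simp [pvMaskOf, h1, h2, h3, h4, h5]
                have hsf : pvSuffix.getD 1 "" = PySem.Str.join "" ([pvP1] : List String) := by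
                  rw [show pvSuffix.getD 1 "" = pvSuffix[1]! from rfl]
                  simp [pvSuffix, pvTexts, PySem.List.enumerate]
                rw [hm, hsf]
                simp [h1, h2, h3, h4, h5, pv_join_cons, pv_join_nil, String.append_assoc]
      · by_cases h2 : "ml-reasoning" ∈ s
        · by_cases h3 : "validation" ∈ s
          · by_cases h4 : "decision-making" ∈ s
            · by_cases h5 : "operation" ∈ s
              · have hm : pvMaskOf s = 30 := by simp [pvMaskOf, h1, h2, h3, h4, h5]
                have hsf : pvSuffix.getD 30 "" = PySem.Str.join "" ([pvP2, pvP3, pvP4, pvP5] : List String) := by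
                  rw [show pvSuffix.getD 30 "" = pvSuffix[30]! from rfl]
                  simp [pvSuffix, pvTexts, PySem.List.enumerate]
                rw [hm, hsf]
                simp [h1, h2, h3, h4, h5, pv_join_cons, pv_join_nil, String.append_assoc]
              · have hm : pvMaskOf s = 14 := by simp [pvMaskOf, h1, h2, h3, h4, h5]
                have hsf : pvSuffix.getD 14 "" = PySem.Str.join "" ([pvP2, pvP3, pvP4] : List String) := by
                  rw [show pvSuffix.getD 14 "" = pvSuffix[14]! from rfl]
                  simp [pvSuffix, pvTexts, PySem.List.enumerate]
                rw [hm, hsf]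
                simp [h1, h2, h3, h4, h5, pv_join_cons, pv_join_nil, String.append_assoc]
            · by_cases h5 : "operation" ∈ s
              · have hm : pvMaskOf s = 22 := by simp [pvMaskOf, h1, h2, h3, h4, h5]
                have hsf : pvSuffix.getD 22 "" = PySem.Str.join "" ([pvP2, pvP3, pvP5] : List String) := by
                  rw [show pvSuffix.getD 22 "" = pvSuffix[22]! from rfl]
                  simp [pvSuffix, pvTexts, PySem.List.enumerate]
                rw [hm, hsf]
                simp [h1, h2, h3, h4, h5, pv_join_cons, pv_join_nil, String.append_assoc]
              · have hm : pvMaskOf s = 6 := by simp [pvMaskOf, h1, h2, h3, h4, h5]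
                have hsf : pvSuffix.getD 6 "" = PySem.Str.join "" ([pvP2, pvP3] : List String) := by
                  rw [show pvSuffix.getD 6 "" = pvSuffix[6]! from rfl]
                  simp [pvSuffix, pvTexts, PySem.List.enumerate]
                rw [hm, hsf]
                simp [h1, h2, h3, h4, h5, pv_join_cons, pv_join_nil, String.append_assoc]
          · by_cases h4 : "decision-making" ∈ s
            · by_cases h5 : "operation" ∈ s
              · have hm : pvMaskOf s = 26 := by simp [pvMaskOf, h1, h2, h3, h4, h5]
                have hsf : pvSuffix.getD 26 "" = PySem.Str.join "" ([pvP2, pvP4, pvP5] : List String) := by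
                  rw [show pvSuffix.getD 26 "" = pvSuffix[26]! from rfl]
                  simp [pvSuffix, pvTexts, PySem.List.enumerate]
                rw [hm, hsf]
                simp [h1, h2, h3, h4, h5, pv_join_cons, pv_join_nil, String.append_assoc]
              · have hm : pvMaskOf s = 10 := by simp [pvMaskOf, h1, h2, h3, h4, h5]
                have hsf : pvSuffix.getD 10 "" = PySem.Str.join "" ([pvP2, pvP4] : List String) := by
                  rw [show pvSuffix.getD 10 "" = pvSuffix[10]! from rfl]
                  simp [pvSuffix, pvTexts, PySem.List.enumerate]
                rw [hm, hsf]
                simp [h1, h2, h3, h4, h5, pv_join_cons, pv_join_nil, String.append_assoc]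
            · by_cases h5 : "operation" ∈ s
              · have hm : pvMaskOf s = 18 := by simp [pvMaskOf, h1, h2, h3, h4, h5]
                have hsf : pvSuffix.getD 18 "" = PySem.Str.join "" ([pvP2, pvP5] : List String) := by
                  rw [show pvSuffix.getD 18 "" = pvSuffix[18]! from rfl]
                  simp [pvSuffix, pvTexts, PySem.List.enumerate]
                rw [hm, hsf]
                simp [h1, h2, h3, h4, h5, pv_join_cons, pv_join_nil, String.append_assoc]
              · have hm : pvMaskOf s = 2 := by simp [pvMaskOf, h1, h2, h3, h4, h5]
                have hsf : pvSuffix.getD 2 "" = PySem.Str.join "" ([pvP2] : List String) := by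
                  rw [show pvSuffix.getD 2 "" = pvSuffix[2]! from rfl]
                  simp [pvSuffix, pvTexts, PySem.List.enumerate]
                rw [hm, hsf]
                simp [h1, h2, h3, h4, h5, pv_join_cons, pv_join_nil, String.append_assoc]
        · by_cases h3 : "validation" ∈ s
          · by_cases h4 : "decision-making" ∈ s
            · by_cases h5 : "operation" ∈ s
              · have hm : pvMaskOf s = 28 := by simp [pvMaskOf, h1, h2, h3, h4, h5]
                have hsf : pvSuffix.getD 28 "" = PySem.Str.join "" ([pvP3, pvP4, pvP5] : List String) := by
                  rw [show pvSuffix.getD 28 "" = pvSuffix[28]! from rfl]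
                  simp [pvSuffix, pvTexts, PySem.List.enumerate]
                rw [hm, hsf]
                simp [h1, h2, h3, h4, h5, pv_join_cons, pv_join_nil, String.append_assoc]
              · have hm : pvMaskOf s = 12 := by simp [pvMaskOf, h1, h2, h3, h4, h5]
                have hsf : pvSuffix.getD 12 "" = PySem.Str.join "" ([pvP3, pvP4] : List String) := by
                  rw [show pvSuffix.getD 12 "" = pvSuffix[12]! from rfl]
                  simp [pvSuffix, pvTexts, PySem.List.enumerate]
                rw [hm, hsf]
                simp [h1, h2, h3, h4, h5, pv_join_cons, pv_join_nil, String.append_assoc]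
            · by_cases h5 : "operation" ∈ s
              · have hm : pvMaskOf s = 20 := by simp [pvMaskOf, h1, h2, h3, h4, h5]
                have hsf : pvSuffix.getD 20 "" = PySem.Str.join "" ([pvP3, pvP5] : List String) := by
                  rw [show pvSuffix.getD 20 "" = pvSuffix[20]! from rfl]
                  simp [pvSuffix, pvTexts, PySem.List.enumerate]
                rw [hm, hsf]
                simp [h1, h2, h3, h4, h5, pv_join_cons, pv_join_nil, String.append_assoc]
              · have hm : pvMaskOf s = 4 := by simp [pvMaskOf, h1, h2, h3, h4, h5]
                have hsf : pvSuffix.getD 4 "" = PySem.Str.join "" ([pvP3] : List String) := by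
                  rw [show pvSuffix.getD 4 "" = pvSuffix[4]! from rfl]
                  simp [pvSuffix, pvTexts, PySem.List.enumerate]
                rw [hm, hsf]
                simp [h1, h2, h3, h4, h5, pv_join_cons, pv_join_nil, String.append_assoc]
          · by_cases h4 : "decision-making" ∈ s
            · by_cases h5 : "operation" ∈ s
              · have hm : pvMaskOf s = 24 := by simp [pvMaskOf, h1, h2, h3, h4, h5]
                have hsf : pvSuffix.getD 24 "" = PySem.Str.join "" ([pvP4, pvP5] : List String) := by
                  rw [show pvSuffix.getD 24 "" = pvSuffix[24]! from rfl]
                  simp [pvSuffix, pvTexts, PySem.List.enumerate]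
                rw [hm, hsf]
                simp [h1, h2, h3, h4, h5, pv_join_cons, pv_join_nil, String.append_assoc]
              · have hm : pvMaskOf s = 8 := by simp [pvMaskOf, h1, h2, h3, h4, h5]
                have hsf : pvSuffix.getD 8 "" = PySem.Str.join "" ([pvP4] : List String) := by
                  rw [show pvSuffix.getD 8 "" = pvSuffix[8]! from rfl]
                  simp [pvSuffix, pvTexts, PySem.List.enumerate]
                rw [hm, hsf]
                simp [h1, h2, h3, h4, h5, pv_join_cons, pv_join_nil, String.append_assoc]
            · by_cases h5 : "operation" ∈ s
              · have hm : pvMaskOf s = 16 := by simp [pvMaskOf, h1, h2, h3, h4, h5]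
                have hsf : pvSuffix.getD 16 "" = PySem.Str.join "" ([pvP5] : List String) := by
                  rw [show pvSuffix.getD 16 "" = pvSuffix[16]! from rfl]
                  simp [pvSuffix, pvTexts, PySem.List.enumerate]
                rw [hm, hsf]
                simp [h1, h2, h3, h4, h5, pv_join_cons, pv_join_nil, String.append_assoc]
              · have hm : pvMaskOf s = 0 := by simp [pvMaskOf, h1, h2, h3, h4, h5]
                have hsf : pvSuffix.getD 0 "" = PySem.Str.join "" ([] : List String) := by
                  rw [show pvSuffix.getD 0 "" = pvSuffix[0]! from rfl]
                  simp [pvSuffix, pvTexts, PySem.List.enumerate]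
                rw [hm, hsf]
                simp [h1, h2, h3, h4, h5, pv_join_cons, pv_join_nil, String.append_assoc]

-- ===== VERDICT (by name: the statement is the Claim_ definition above) =====
theorem get_analyze_data_prompt_spec : Claim_equal_get_analyze_data_prompt := by
  intro q sel _
  exact pv_eq q sel
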